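-- pv_equiv track=rewrite | github.com/LeopardCheetah/sort | the weird ones/tuple_sort.py | num_to_tuple
-- ===== SOURCE A (Python) =====
-- def num_to_tuple(num, mod, bits):
--     # so i implemented finding the number of bits or chars needed
--     # but to ensure consistency and so that there are same number of chars (0, 0, 1) compared to (1, 2, 0) vs (1) compared to (1, 2, 0)
--     # im just gonna need a preset number of bits
--
--     digits = []
--
--     v = num
--
--     for i in range(bits):
--         digits.append(v // (mod**(bits - i - 1)))
--         v = v % (mod**(bits - i - 1))
--
--     # convert list to tuple
--     # holy shit im saved you can add tuples :O
--
--     return tuple(digits)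
--
--
--     # me when i look back at my code (written like 60 minutes ago) and realize that there's a built in method for this:
--     tupl = () # empty, len 0
--     for digit in digits:
--         digit_tupl = (digit, ) # looks terrible but this is a singleton tuple
--         tupl += digit_tupl
--
--     return tupl
-- ===== SOURCE B (Python) =====
-- def num_to_tuple(num, mod, bits):
--     # Stateless, least-significant-first construction: each low digit is read
--     # directly off the ORIGINAL num as (num % mod**(j+1)) // mod**j (with a
--     # running power), the unreduced top digit is appended last, and the list is
--     # reversed.  Correct because Python's floor-mod depends only on the residue
--     # class: mod**j | mod**k (j <= k) gives (num % mod**k) % mod**j == num % mod**j,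
--     # so A's carried remainder chain collapses to residues of num itself.
--     if bits <= 0:
--         return ()
--     digits = []
--     p = 1
--     for _ in range(bits - 1):
--         digits.append(num % (p * mod) // p)
--         p *= mod
--     digits.append(num // p)
--     return tuple(reversed(digits))
-- ===== Notes on version B (the rewrite author's own statement) =====
-- stated objective: alternative
-- what changed: A peels digits most-significant-first with a carried remainder v and a fresh power mod**(bits-i-1) each step; B builds the tuple least-significant-first and stateless, reading each digit directly off the original num as (num % (p*mod)) // p with one running power p, then appends the unreduced top digit and reverses; correct since floor-mod collapses under divisibility.
import Mathlib
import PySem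

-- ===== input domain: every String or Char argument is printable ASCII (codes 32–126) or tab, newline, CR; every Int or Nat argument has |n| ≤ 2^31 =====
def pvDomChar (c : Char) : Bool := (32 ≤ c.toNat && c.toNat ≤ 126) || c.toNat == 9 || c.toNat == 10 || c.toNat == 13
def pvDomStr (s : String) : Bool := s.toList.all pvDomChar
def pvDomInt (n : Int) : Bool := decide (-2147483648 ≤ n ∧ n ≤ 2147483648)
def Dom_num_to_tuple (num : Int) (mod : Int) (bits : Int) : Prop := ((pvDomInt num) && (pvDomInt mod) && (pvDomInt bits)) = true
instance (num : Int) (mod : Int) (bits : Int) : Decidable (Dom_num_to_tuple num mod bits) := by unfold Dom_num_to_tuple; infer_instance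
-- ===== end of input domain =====

-- B builds the tuple least-significant-digit first and stateless (each digit read off the
-- original num via a running power, top digit appended last, list reversed) instead of A's
-- most-significant-first carried-remainder peel; objective: alternative (same asymptotic cost).


-- ===== PORT A =====
-- loop body of A: digits.append(v // mod**(bits-i-1)); v = v % mod**(bits-i-1)
-- (for i in range(bits) we have 0 ≤ i < bits, so the exponent bits-i-1 is ≥ 0 and .toNat is exact)
def aStep (mod : Int) (bits : Int) (st : List Int × Int) (i : Int) : List Int × Int :=
  (st.1 ++ [PySem.Int.floordiv st.2 (mod ^ (bits - i - 1).toNat)],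
   PySem.Int.mod st.2 (mod ^ (bits - i - 1).toNat))

def num_to_tuple (num : Int) (mod : Int) (bits : Int) : List Int :=
  ((PySem.List.pyRange 0 bits 1).foldl (aStep mod bits) ([], num)).1

-- ===== PORT B =====
-- loop of B: for _ in range(bits-1): digits.append(num % (p*mod) // p); p *= mod
-- followed by digits.append(num // p) and reversal; the Nat argument counts the
-- remaining iterations of range(bits-1).
def bLoop (num mod : Int) : Nat → Int → List Int → List Int
  | 0, p, digits => (digits ++ [PySem.Int.floordiv num p]).reverse
  | j + 1, p, digits =>
      bLoop num mod j (p * mod)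
        (digits ++ [PySem.Int.floordiv (PySem.Int.mod num (p * mod)) p])

def num_to_tuple_alt (num : Int) (mod : Int) (bits : Int) : List Int :=
  if bits ≤ 0 then [] else bLoop num mod (bits - 1).toNat 1 []

-- ===== PRECONDITION & SPEC =====
-- A raises ZeroDivisionError exactly when mod = 0 and bits ≥ 2 (it divides by mod**(bits-i-1) = 0);
-- B raises there too. Pre_ excludes exactly those inputs; A returns on every input Pre_ admits.
def Pre_num_to_tuple (num : Int) (mod : Int) (bits : Int) : Prop := mod ≠ 0 ∨ bits ≤ 1
instance (num : Int) (mod : Int) (bits : Int) : Decidable (Pre_num_to_tuple num mod bits) := by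
  unfold Pre_num_to_tuple; infer_instance

def pvWitness_num_to_tuple : Int × Int × Int := (10, 3, 4)

def Spec_num_to_tuple (num : Int) (mod : Int) (bits : Int) (out : List Int) : Prop := out = num_to_tuple_alt num mod bits
instance (num : Int) (mod : Int) (bits : Int) (out : List Int) : Decidable (Spec_num_to_tuple num mod bits out) := by unfold Spec_num_to_tuple; infer_instance

-- ===== CLAIM =====
def Claim_equal_num_to_tuple : Prop := ∀ (num : Int) (mod : Int) (bits : Int), Dom_num_to_tuple num mod bits → Pre_num_to_tuple num mod bits → Spec_num_to_tuple num mod bits (num_to_tuple num mod bits)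

-- ===== LEMMAS AND PROOFS =====

-- A's result, characterised: digit list of v, most significant first, carried remainder;
-- the top digit is NOT reduced mod `mod`, exactly like A.
def specDigits (mod : Int) : Nat → Int → List Int
  | 0, _ => []
  | k + 1, v =>
      PySem.Int.floordiv v (mod ^ k) :: specDigits mod k (PySem.Int.mod v (mod ^ k))

-- the low digits read off num directly: lowD num mod j i = [d_{i+j-1}, …, d_i]
-- where d_t = (num % mod^(t+1)) // mod^t
def lowD (num mod : Int) : Nat → Nat → List Int
  | 0, _ => []
  | j + 1, i =>
      PySem.Int.floordiv (PySem.Int.mod num (mod ^ (i + j + 1))) (mod ^ (i + j)) :: lowD num mod j i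

theorem lowD_snoc (num mod : Int) :
    ∀ (j i : Nat), lowD num mod (j + 1) i
      = lowD num mod j (i + 1) ++ [PySem.Int.floordiv (PySem.Int.mod num (mod ^ (i + 1))) (mod ^ i)] := by
  intro j
  induction j with
  | zero => intro i; simp [lowD]
  | succ k ih =>
      intro i
      have h1 : i + (k + 1) + 1 = i + 1 + k + 1 := by omega
      have h2 : i + (k + 1) = i + 1 + k := by omega
      show PySem.Int.floordiv (PySem.Int.mod num (mod ^ (i + (k + 1) + 1))) (mod ^ (i + (k + 1)))
            :: lowD num mod (k + 1) i = _
      rw [ih i, h1, h2]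
      simp [lowD, List.cons_append]

-- A's carried-remainder chain collapses to residues of num itself (floor-mod under divisibility)
theorem specDigits_eq_lowD (mod : Int) :
    ∀ (k : Nat) (num : Int),
      specDigits mod k (PySem.Int.mod num (mod ^ k)) = lowD num mod k 0 := by
  intro k
  induction k with
  | zero => intro num; simp [specDigits, lowD]
  | succ j ih =>
      intro num
      have hcollapse : PySem.Int.mod (PySem.Int.mod num (mod ^ (j + 1))) (mod ^ j)
          = PySem.Int.mod num (mod ^ j) := by
        unfold PySem.Int.mod
        exact Int.fmod_fmod_of_dvd num (pow_dvd_pow mod (by omega))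
      simp only [specDigits, hcollapse, ih num, lowD, Nat.zero_add]

-- B's loop, characterised: starting with p = mod^i and accumulator `digits`,
-- the result is top digit :: remaining low digits ++ digits.reverse
theorem bLoop_spec (num mod : Int) :
    ∀ (j i : Nat) (digits : List Int),
      bLoop num mod j (mod ^ i) digits
        = (PySem.Int.floordiv num (mod ^ (i + j)) :: lowD num mod j i) ++ digits.reverse := by
  intro j
  induction j with
  | zero => intro i digits; simp [bLoop, lowD]
  | succ k ih =>
      intro i digits
      have hp : (mod ^ i : Int) * mod = mod ^ (i + 1) := by ring
      simp only [bLoop, hp]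
      rw [ih (i + 1) (digits ++ [PySem.Int.floordiv (PySem.Int.mod num (mod ^ (i + 1))) (mod ^ i)])]
      rw [lowD_snoc]
      have : i + 1 + k = i + (k + 1) := by omega
      simp [this]

-- A's fold equals specDigits
theorem aFold_eq_spec (mod bits : Int) :
    ∀ (k : Nat) (i0 v : Int) (acc : List Int), bits - i0 = (k : Int) →
      ((PySem.List.pyRange i0 bits 1).foldl (aStep mod bits) (acc, v)).1
        = acc ++ specDigits mod k v := by
  intro k
  induction k with
  | zero =>
      intro i0 v acc h
      have : PySem.List.pyRange i0 bits 1 = [] := by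
        rw [PySem.List.pyRange_one]
        have : (bits - i0).toNat = 0 := by omega
        simp [this]
      simp [this, specDigits]
  | succ k ih =>
      intro i0 v acc h
      have hlt : i0 < bits := by omega
      rw [PySem.List.pyRange_one_cons hlt]
      have hexp : (bits - i0 - 1).toNat = k := by omega
      simp only [List.foldl_cons, aStep, hexp]
      rw [ih (i0 + 1) (PySem.Int.mod v (mod ^ k))
            (acc ++ [PySem.Int.floordiv v (mod ^ k)]) (by omega)]
      simp [specDigits]

-- ===== VERDICT =====
theorem num_to_tuple_spec : Claim_equal_num_to_tuple := by
  intro num mod bits _hdom _hpre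
  unfold Spec_num_to_tuple num_to_tuple num_to_tuple_alt
  by_cases hb : bits ≤ 0
  · have : PySem.List.pyRange 0 bits 1 = [] := by
      rw [PySem.List.pyRange_one]; simp; omega
    rw [this, if_pos hb]; rfl
  · have hA : ((PySem.List.pyRange 0 bits 1).foldl (aStep mod bits) ([], num)).1
        = specDigits mod bits.toNat num :=
      aFold_eq_spec mod bits bits.toNat 0 num [] (by omega)
    rw [hA, if_neg hb]
    have hB : bLoop num mod (bits - 1).toNat 1 []
        = (PySem.Int.floordiv num (mod ^ (0 + (bits - 1).toNat)) :: lowD num mod (bits - 1).toNat 0) ++ List.reverse [] := by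
      have := bLoop_spec num mod (bits - 1).toNat 0 []
      simpa using this
    rw [hB]
    have hk : (bits - 1).toNat + 1 = bits.toNat := by omega
    rw [← hk]
    simp only [Nat.zero_add, specDigits, List.reverse_nil, List.append_nil]
    rw [specDigits_eq_lowD]
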